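-- pv_equiv track=rewrite | github.com/ruiny02/SPL_ws | PA1/more_tests/run_tests.py | solve_pattern
-- ===== SOURCE A (Python) =====
-- def normalize(word: str) -> str:
--     return word.lower()
--
-- def is_sep(ch: str) -> bool:
--     return ch in (" ", "\t")
--
-- def tokenize_line(line: str) -> list[tuple[str, int]]:
--     tokens: list[tuple[str, int]] = []
--     i = 0
--     while i < len(line):
--         while i < len(line) and is_sep(line[i]):
--             i += 1
--         if i >= len(line):
--             break
--         start = i
--         while i < len(line) and not is_sep(line[i]):
--             i += 1
--         tokens.append((line[start:i], start))
--     return tokens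
--
-- def format_result(items: list[str]) -> str:
--     if not items:
--         return "\n"
--     return " ".join(items) + " \n"
--
-- def solve_pattern(lines: list[str], query: str) -> str:
--     if " " in query or "\t" in query:
--         return "\n"
--     if query.count("*") != 1:
--         return "\n"
--     left, right = query.split("*", 1)
--     if not left or not right:
--         return "\n"
--     left = normalize(left)
--     right = normalize(right)
--     hits: list[str] = []
--     for line_no, line in enumerate(lines, start=1):
--         words = [(normalize(token), start) for token, start in tokenize_line(line)]
--         matched = False
--         first_left_start: int | None = None
--         last_right_start: int | None = None
--
--         for word, start in words:
--             if word == left and first_left_start is None: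
--                 first_left_start = start
--             if word == right:
--                 last_right_start = start
--
--         if first_left_start is not None and last_right_start is not None and first_left_start < last_right_start:
--             matched = True
--         if matched:
--             hits.append(str(line_no))
--     return format_result(hits)
-- ===== SOURCE B (Python) =====
-- def _words(line: str) -> list[str]:
--     ws: list[str] = []
--     cur = ""
--     for ch in line.lower():
--         if ch == " " or ch == "\t":
--             if cur:
--                 ws.append(cur)
--                 cur = ""
--         else:
--             cur += ch
--     if cur:
--         ws.append(cur)
--     return ws
--
-- def _line_matches(line: str, left: str, right: str) -> bool:
--     ws = _words(line)
--     if left not in ws or right not in ws: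
--         return False
--     return ws.index(left) < len(ws) - 1 - ws[::-1].index(right)
--
-- def solve_pattern(lines: list[str], query: str) -> str:
--     if " " in query or "\t" in query:
--         return "\n"
--     if query.count("*") != 1:
--         return "\n"
--     left, right = query.split("*", 1)
--     if not left or not right:
--         return "\n"
--     left, right = left.lower(), right.lower()
--     hits = [str(no) for no, line in enumerate(lines, 1) if _line_matches(line, left, right)]
--     return " ".join(hits) + " \n" if hits else "\n"
-- ===== Notes on version B (the rewrite author's own statement) =====
-- stated objective: simpler
-- what changed: B drops A's character-index tokenizer and the single-pass first/last-start tracking: it splits each lowercased line into words with a plain accumulator and marks a hit iff the first index of the left word precedes the last index of the right word (list index and index on the reversed list).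
import Mathlib
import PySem

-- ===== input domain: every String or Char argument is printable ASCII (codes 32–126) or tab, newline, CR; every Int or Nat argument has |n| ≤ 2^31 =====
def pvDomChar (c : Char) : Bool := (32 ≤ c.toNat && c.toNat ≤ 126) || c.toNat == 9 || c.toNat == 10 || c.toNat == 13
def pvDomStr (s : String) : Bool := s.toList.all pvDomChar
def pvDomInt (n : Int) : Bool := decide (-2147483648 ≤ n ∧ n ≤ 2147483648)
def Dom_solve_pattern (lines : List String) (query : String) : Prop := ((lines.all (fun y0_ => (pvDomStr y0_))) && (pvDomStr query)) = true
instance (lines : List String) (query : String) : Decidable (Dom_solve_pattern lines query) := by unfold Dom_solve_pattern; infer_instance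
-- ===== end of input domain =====

-- B replaces A's position-tracking tokenizer and single-pass min/max start tracking by an
-- accumulator word-splitter plus a first-index / last-index (index on the reversed list)
-- comparison; objective: simpler.

-- ===== PORT A =====
def pyIsSep (ch : Char) : Bool := ch == ' ' || ch == '\t'

-- inner `while i < len(line) and not is_sep(line[i])` loop: returns (word chars, rest)
def pyTakeWord : List Char → List Char × List Char
  | [] => ([], [])
  | c :: cs =>
    if pyIsSep c then ([], c :: cs)
    else
      let p := pyTakeWord cs
      (c :: p.1, p.2)

-- needed for termination of pyTokAux
theorem pyTakeWord_rest_le (cs : List Char) : (pyTakeWord cs).2.length ≤ cs.length := by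
  induction cs with
  | nil => simp [pyTakeWord]
  | cons c cs ih =>
    simp only [pyTakeWord]
    split
    · simp
    · simpa using Nat.le_succ_of_le ih

-- outer `while i < len(line)` loop of tokenize_line, carrying the current position i
def pyTokAux : List Char → Int → List (String × Int)
  | [], _ => []
  | c :: cs, i =>
    if pyIsSep c then pyTokAux cs (i + 1)
    else
      let p := pyTakeWord (c :: cs)
      (String.ofList p.1, i) :: pyTokAux p.2 (i + p.1.length)
termination_by cs _ => cs.length
decreasing_by
  · simp
  · simp only [pyTakeWord, *]
    split
    · simp_all [pyIsSep]
    · simpa using Nat.lt_succ_of_le (pyTakeWord_rest_le cs)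

def tokenize_line (line : String) : List (String × Int) := pyTokAux line.toList 0

def format_result (items : List String) : String :=
  if items = [] then "\n"
  else String.ofList (PySem.Chars.join [' '] (items.map String.toList) ++ [' ', '\n'])

def lineMatchA (left right : String) (line : String) : Bool :=
  let words := (tokenize_line line).map (fun t => (PySem.Str.lower t.1, t.2))
  let st := words.foldl
    (fun (st : Option Int × Option Int) w =>
      ((if w.1 == left && st.1 == none then some w.2 else st.1),
       (if w.1 == right then some w.2 else st.2)))
    (none, none)
  match st with
  | (some a, some b) => decide (a < b)
  | _ => false

def solve_pattern (lines : List String) (query : String) : String :=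
  if PySem.Str.isIn " " query || PySem.Str.isIn "\t" query then "\n"
  else if PySem.Str.count query "*" ≠ 1 then "\n"
  else
    match PySem.Str.splitMax? query "*" 1 with
    | some [l0, r0] =>
      if l0 = "" || r0 = "" then "\n"
      else
        let left := PySem.Str.lower l0
        let right := PySem.Str.lower r0
        let hits := (PySem.List.enumerate lines 1).foldl
          (fun hits p => if lineMatchA left right p.2 then hits ++ [PySem.Int.toStr p.1] else hits) []
        format_result hits
    | _ => "\n"  -- unreachable: query contains exactly one '*'

-- ===== PORT B =====
def wordsB (line : String) : List String :=
  let st := (PySem.Str.lower line).toList.foldl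
    (fun (st : List String × List Char) ch =>
      if ch == ' ' || ch == '\t' then
        if st.2 ≠ [] then (st.1 ++ [String.ofList st.2], ([] : List Char)) else st
      else (st.1, st.2 ++ [ch]))
    ([], [])
  if st.2 ≠ [] then st.1 ++ [String.ofList st.2] else st.1

def lineMatchB (line left right : String) : Bool :=
  let ws := wordsB line
  if ¬ (left ∈ ws) || ¬ (right ∈ ws) then false
  else
    let i := (PySem.List.index? ws left).getD 0      -- `.index` total here: membership checked
    let j := (PySem.List.index? ws.reverse right).getD 0
    decide ((i : Int) < (ws.length : Int) - 1 - (j : Int))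

def solve_pattern_alt (lines : List String) (query : String) : String :=
  if PySem.Str.isIn " " query || PySem.Str.isIn "\t" query then "\n"
  else if PySem.Str.count query "*" ≠ 1 then "\n"
  else
    let parts := (PySem.Str.splitMax? query "*" 1).getD []  -- '*' is nonempty: never none
    if parts.length ≠ 2 then "\n"  -- unreachable: query contains exactly one '*'
    else
      let l0 := parts.headD ""
      let r0 := (parts.drop 1).headD ""
      if l0 = "" || r0 = "" then "\n"
      else
        let left := PySem.Str.lower l0
        let right := PySem.Str.lower r0
        let hits := ((PySem.List.enumerate lines 1).filter
            (fun p => lineMatchB p.2 left right)).map (fun p => PySem.Int.toStr p.1)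
        if hits = [] then "\n"
        else String.ofList (PySem.Chars.join [' '] (hits.map String.toList) ++ [' ', '\n'])

-- ===== PRECONDITION & SPEC =====
def Spec_solve_pattern (lines : List String) (query : String) (out : String) : Prop := out = solve_pattern_alt lines query
instance (lines : List String) (query : String) (out : String) : Decidable (Spec_solve_pattern lines query out) := by unfold Spec_solve_pattern; infer_instance

-- ===== CLAIM (what is proved, stated in full; the proofs are below) =====
def Claim_equal_solve_pattern : Prop := ∀ (lines : List String) (query : String), Dom_solve_pattern lines query → Spec_solve_pattern lines query (solve_pattern lines query)

-- ===== LEMMAS AND PROOFS =====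

-- maximal non-separator chunks of a character list (proof-only specification)
def wchunks : List Char → List (List Char)
  | [] => []
  | c :: cs =>
    if pyIsSep c then wchunks cs
    else (c :: cs.takeWhile (fun d => !pyIsSep d)) :: wchunks (cs.dropWhile (fun d => !pyIsSep d))
termination_by cs => cs.length
decreasing_by
  · simp
  · simpa using Nat.lt_succ_of_le (List.length_dropWhile_le _ _)

theorem pyTakeWord_eq (cs : List Char) :
    pyTakeWord cs = (cs.takeWhile (fun d => !pyIsSep d), cs.dropWhile (fun d => !pyIsSep d)) := by
  induction cs with
  | nil => simp [pyTakeWord]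
  | cons c cs ih =>
    simp only [pyTakeWord, List.takeWhile_cons, List.dropWhile_cons]
    by_cases h : pyIsSep c <;> simp [h, ih]

theorem pyTokAux_fst (cs : List Char) (i : Int) :
    (pyTokAux cs i).map Prod.fst = (wchunks cs).map String.ofList := by
  induction cs, i using pyTokAux.induct with
  | case1 i => simp [pyTokAux, wchunks]
  | case2 c cs i h ih => simp only [pyTokAux, wchunks, if_pos h]; exact ih
  | case3 c cs i h p ih =>
    have hp : p = (c :: cs.takeWhile (fun d => !pyIsSep d), cs.dropWhile (fun d => !pyIsSep d)) := by
      show pyTakeWord (c :: cs) = _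
      rw [pyTakeWord_eq]
      simp [h]
    rw [hp] at ih
    have ht : List.takeWhile (fun d => !pyIsSep d) (c :: cs) = c :: List.takeWhile (fun d => !pyIsSep d) cs := by
      simp [h]
    have hd : List.dropWhile (fun d => !pyIsSep d) (c :: cs) = List.dropWhile (fun d => !pyIsSep d) cs := by
      simp [h]
    simp only [pyTokAux, wchunks, if_neg h, pyTakeWord_eq, List.map_cons, ht, hd]
    simp only [List.length_cons, Nat.cast_add, Nat.cast_one] at ih
    simpa using ih

theorem pyTokAux_lb (cs : List Char) (i : Int) : ∀ p ∈ pyTokAux cs i, i ≤ p.2 := by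
  induction cs, i using pyTokAux.induct with
  | case1 i => simp [pyTokAux]
  | case2 c cs i h ih =>
    simp only [pyTokAux, if_pos h]
    exact fun p hp => le_trans (by omega) (ih p hp)
  | case3 c cs i h q ih =>
    simp only [pyTokAux, if_neg h, List.mem_cons]
    rintro p (rfl | hp)
    · exact le_refl _
    · have := ih p hp; omega

theorem pyTokAux_mono (cs : List Char) (i : Int) :
    ((pyTokAux cs i).map Prod.snd).Pairwise (· < ·) := by
  induction cs, i using pyTokAux.induct with
  | case1 i => simp [pyTokAux]
  | case2 c cs i h ih => simpa only [pyTokAux, if_pos h] using ih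
  | case3 c cs i h q ih =>
    simp only [pyTokAux, if_neg h, List.map_cons, List.pairwise_cons]
    refine ⟨?_, ih⟩
    intro a ha
    simp only [List.mem_map] at ha
    obtain ⟨p, hp, rfl⟩ := ha
    have h1 := pyTokAux_lb _ _ p hp
    have h2 : (1 : Int) ≤ ((pyTakeWord (c :: cs)).1.length : Int) := by
      simp [pyTakeWord, if_neg h]
    omega

theorem char_beq_toNat (a b : Char) : (a == b) = (a.toNat == b.toNat) := by
  by_cases h : a = b
  · subst h; simp
  · have hn : a.toNat ≠ b.toNat := fun hn => h (Char.ext (UInt32.toNat_inj.mp hn))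
    simp [h, hn]

theorem sep_lowerChar (c : Char) : pyIsSep (PySem.Chars.lowerChar c) = pyIsSep c := by
  unfold PySem.Chars.lowerChar
  split
  · next hu =>
    have hA : 65 ≤ c.toNat ∧ c.toNat ≤ 90 := by
      unfold PySem.Chars.isupper at hu
      simp only [Bool.and_eq_true, decide_eq_true_eq, Char.le_def] at hu
      exact ⟨hu.1, hu.2⟩
    have hval : (Char.ofNat (c.toNat + 32)).toNat = c.toNat + 32 := by
      rw [Char.toNat_ofNat, if_pos]; left; omega
    simp only [pyIsSep, char_beq_toNat, hval]
    have h32 : (' ').toNat = 32 := by decide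
    have h9 : ('\t').toNat = 9 := by decide
    rw [h32, h9]
    have e1 : (c.toNat + 32 == 32) = false := by simp only [beq_eq_false_iff_ne]; omega
    have e2 : (c.toNat + 32 == 9) = false := by simp only [beq_eq_false_iff_ne]; omega
    have e3 : (c.toNat == 32) = false := by simp only [beq_eq_false_iff_ne]; omega
    have e4 : (c.toNat == 9) = false := by simp only [beq_eq_false_iff_ne]; omega
    rw [e1, e2, e3, e4]
  · rfl

theorem wchunks_map_lower (cs : List Char) :
    wchunks (cs.map PySem.Chars.lowerChar) = (wchunks cs).map (List.map PySem.Chars.lowerChar) := by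
  have hpf : ((fun d => !pyIsSep d) ∘ PySem.Chars.lowerChar) = (fun d => !pyIsSep d) := by
    funext d; simp [Function.comp, sep_lowerChar]
  induction cs using wchunks.induct with
  | case1 => simp [wchunks]
  | case2 c cs h ih =>
    have hc : pyIsSep (PySem.Chars.lowerChar c) = true := by rw [sep_lowerChar]; exact h
    simp only [List.map_cons, wchunks, if_pos h, if_pos hc]
    exact ih
  | case3 c cs h ih =>
    have hc : ¬ pyIsSep (PySem.Chars.lowerChar c) = true := by rw [sep_lowerChar]; exact h
    simp only [List.map_cons, wchunks, if_neg h, if_neg hc, List.takeWhile_map,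
      List.dropWhile_map, hpf]
    rw [ih]

theorem wchunks_append_word (cur cs : List Char) (hne : cur ≠ [])
    (hns : ∀ c ∈ cur, pyIsSep c = false) :
    wchunks (cur ++ cs) = (cur ++ cs.takeWhile (fun d => !pyIsSep d)) :: wchunks (cs.dropWhile (fun d => !pyIsSep d)) := by
  obtain ⟨c, cur', rfl⟩ : ∃ c cur', cur = c :: cur' := by
    cases cur with
    | nil => exact absurd rfl hne
    | cons c cur' => exact ⟨c, cur', rfl⟩
  have hall : ∀ x ∈ cur', (fun d => !pyIsSep d) x = true := by
    intro x hx; simp [hns x (List.mem_cons_of_mem _ hx)]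
  have hc : ¬ pyIsSep c = true := by simp [hns c List.mem_cons_self]
  simp only [List.cons_append, wchunks, if_neg hc,
    List.takeWhile_append_of_pos hall, List.dropWhile_append_of_pos hall]

def stepB : List String × List Char → Char → List String × List Char :=
  fun st ch =>
    if ch == ' ' || ch == '\t' then
      if st.2 ≠ [] then (st.1 ++ [String.ofList st.2], ([] : List Char)) else st
    else (st.1, st.2 ++ [ch])

def finishB (st : List String × List Char) : List String :=
  if st.2 ≠ [] then st.1 ++ [String.ofList st.2] else st.1

theorem foldB_eq (cs : List Char) (ws : List String) (cur : List Char)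
    (hcur : ∀ c ∈ cur, pyIsSep c = false) :
    finishB (cs.foldl stepB (ws, cur)) = ws ++ (wchunks (cur ++ cs)).map String.ofList := by
  induction cs generalizing ws cur with
  | nil =>
    by_cases hc : cur = []
    · simp [hc, wchunks, finishB]
    · have := wchunks_append_word cur [] hc hcur
      simp only [List.append_nil] at this
      simp [hc, this, wchunks, finishB]
  | cons ch cs ih =>
    simp only [List.foldl_cons]
    by_cases hsep : (ch == ' ' || ch == '\t') = true
    · have hsep' : pyIsSep ch = true := hsep
      by_cases hc : cur = []
      · subst hc
        have hstep : stepB (ws, ([] : List Char)) ch = (ws, []) := by simp [stepB, hsep]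
        rw [hstep, ih ws [] (by simp)]
        have hw : wchunks (([] : List Char) ++ ch :: cs) = wchunks (([] : List Char) ++ cs) := by
          simp [wchunks, hsep']
        rw [hw]
      · have hstep : stepB (ws, cur) ch = (ws ++ [String.ofList cur], []) := by
          simp [stepB, hsep, hc]
        rw [hstep, ih _ [] (by simp)]
        have hw : wchunks (cur ++ ch :: cs) = cur :: wchunks cs := by
          rw [wchunks_append_word cur (ch :: cs) hc hcur]
          simp [hsep', wchunks]
        rw [hw]
        simp
    · have hsep' : pyIsSep ch = false := by
        simp only [pyIsSep, Bool.or_eq_false_iff, beq_eq_false_iff_ne, ne_eq]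
        simpa using hsep
      have hstep : stepB (ws, cur) ch = (ws, cur ++ [ch]) := by simp [stepB, hsep]
      have hcur' : ∀ c ∈ cur ++ [ch], pyIsSep c = false := by
        intro c hcm
        rcases List.mem_append.mp hcm with hcm | hcm
        · exact hcur c hcm
        · simp only [List.mem_singleton] at hcm; subst hcm; exact hsep'
      rw [hstep, ih ws (cur ++ [ch]) hcur']
      congr 3
      simp

theorem wordsB_eq_wchunks (line : String) :
    wordsB line = (wchunks ((PySem.Str.lower line).toList)).map String.ofList := by
  have h : wordsB line = finishB (((PySem.Str.lower line).toList).foldl stepB ([], [])) := rfl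
  rw [h, foldB_eq _ [] [] (by simp)]
  simp

theorem foldA_eq (left right : String) (ps : List (String × Int)) (fl0 lr0 : Option Int) :
    ps.foldl (fun (st : Option Int × Option Int) w =>
      ((if w.1 == left && st.1 == none then some w.2 else st.1),
       (if w.1 == right then some w.2 else st.2))) (fl0, lr0)
    = (fl0.or ((ps.find? (fun p => p.1 == left)).map Prod.snd),
       ((ps.reverse.find? (fun p => p.1 == right)).map Prod.snd).or lr0) := by
  induction ps generalizing fl0 lr0 with
  | nil => simp
  | cons p ps ih =>
    simp only [List.foldl_cons, ih, List.reverse_cons, List.find?_append]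
    cases fl0 <;> by_cases hL : (p.1 == left) = true <;> by_cases hR : (p.1 == right) = true <;>
      simp [hL, hR]

theorem find?_eq_idxOf (v : String) (toks : List (String × Int)) :
    toks.find? (fun p => p.1 == v) = (List.idxOf? v (toks.map Prod.fst)).bind (fun k => toks[k]?) := by
  induction toks with
  | nil => simp
  | cons t ts ih =>
    by_cases h : (t.1 == v) = true <;>
      simp [h, List.idxOf?_cons, ih, Option.bind_map]

theorem pairwise_lt_getElem_iff (ss : List Int) (h : ss.Pairwise (· < ·)) (i j : Nat)
    (hi : i < ss.length) (hj : j < ss.length) : ss[i] < ss[j] ↔ i < j := by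
  rw [List.pairwise_iff_getElem] at h
  constructor
  · intro hlt
    by_contra hn
    push Not at hn
    rcases Nat.lt_or_ge j i with hji | hij
    · exact absurd (h j i hj hi hji) (by omega)
    · have : i = j := by omega
      subst this; omega
  · exact fun hij => h i j hi hj hij

theorem lineMatch_eq (left right line : String) :
    lineMatchA left right line = lineMatchB line left right := by
  have hfst : ((tokenize_line line).map (fun t => (PySem.Str.lower t.1, t.2))).map Prod.fst
      = wordsB line := by
    rw [wordsB_eq_wchunks, PySem.Str.toList_lower]
    simp only [PySem.Chars.lower]
    rw [wchunks_map_lower]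
    unfold tokenize_line
    rw [List.map_map]
    have h1 : (Prod.fst ∘ fun t : String × Int => (PySem.Str.lower t.1, t.2))
        = PySem.Str.lower ∘ Prod.fst := rfl
    rw [h1, ← List.map_map, pyTokAux_fst, List.map_map, List.map_map]
    apply List.map_congr_left
    intro w _
    simp only [Function.comp, PySem.Str.lower, String.toList_ofList, PySem.Chars.lower]
  have hsnd : ((tokenize_line line).map (fun t => (PySem.Str.lower t.1, t.2))).map Prod.snd
      = (pyTokAux line.toList 0).map Prod.snd := by
    unfold tokenize_line
    rw [List.map_map]
    rfl
  set toks := (tokenize_line line).map (fun t => (PySem.Str.lower t.1, t.2)) with htoks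
  have hmono : (toks.map Prod.snd).Pairwise (· < ·) := by
    rw [hsnd]; exact pyTokAux_mono _ _
  have hlen : toks.length = (wordsB line).length := by
    rw [← hfst, List.length_map]
    simp [htoks]
  simp only [lineMatchA, lineMatchB, ← htoks]
  rw [foldA_eq, Option.none_or, Option.or_none, find?_eq_idxOf, find?_eq_idxOf,
    List.map_reverse, hfst]
  by_cases hl : left ∈ wordsB line
  · by_cases hr : right ∈ wordsB line
    · have hl' : PySem.List.index? (wordsB line) left ≠ none :=
        fun h => ((PySem.List.index?_eq_none_iff _ _).mp h) hl
      have hr' : PySem.List.index? ((wordsB line).reverse) right ≠ none :=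
        fun h => ((PySem.List.index?_eq_none_iff _ _).mp h) (List.mem_reverse.mpr hr)
      obtain ⟨i, hi⟩ := Option.ne_none_iff_exists.mp hl'
      obtain ⟨j, hj⟩ := Option.ne_none_iff_exists.mp hr'
      obtain ⟨hilt, -, -⟩ := PySem.List.getElem_of_index?_eq_some hi.symm
      obtain ⟨hjlt, -, -⟩ := PySem.List.getElem_of_index?_eq_some hj.symm
      rw [List.length_reverse] at hjlt
      have hi' : List.idxOf? left (wordsB line) = some i := by
        rw [← PySem.List.index?_eq_idxOf?, ← hi]
      have hj' : List.idxOf? right ((wordsB line).reverse) = some j := by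
        rw [← PySem.List.index?_eq_idxOf?, ← hj]
      have hik : i < toks.length := by omega
      have hjk : j < toks.reverse.length := by simp; omega
      rw [hi', hj', ← hi, ← hj]
      simp only [Option.bind_some, List.getElem?_eq_getElem hik, List.getElem?_eq_getElem hjk,
        Option.map_some, Option.getD_some]
      have hrev : toks.reverse[j] = toks[toks.length - 1 - j] := List.getElem_reverse _
      rw [hrev, if_neg (by simp [hl, hr]), decide_eq_decide]
      have hiff := pairwise_lt_getElem_iff (toks.map Prod.snd) hmono i (toks.length - 1 - j)
        (by simp; omega) (by simp; omega)
      simp only [List.getElem_map] at hiff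
      rw [hiff]
      omega
    · have h0 : List.idxOf? right ((wordsB line).reverse) = none := by
        rw [List.idxOf?_eq_none_iff, List.mem_reverse]; exact hr
      simp [h0, hl, hr]
  · have h0 : List.idxOf? left (wordsB line) = none := by
      rw [List.idxOf?_eq_none_iff]; exact hl
    simp [h0, hl]

theorem solve_pattern_eq (lines : List String) (query : String) :
    solve_pattern lines query = solve_pattern_alt lines query := by
  unfold solve_pattern solve_pattern_alt format_result
  by_cases h1 : (PySem.Str.isIn " " query || PySem.Str.isIn "\t" query) = true
  · simp only [if_pos h1]
  · simp only [if_neg h1]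
    by_cases h2 : PySem.Str.count query "*" ≠ 1
    · simp only [if_pos h2]
    · simp only [if_neg h2]
      rcases PySem.Str.splitMax? query "*" 1 with - | ls
      · rfl
      · rcases ls with - | ⟨l0, ls⟩
        · rfl
        · rcases ls with - | ⟨r0, ls⟩
          · rfl
          · rcases ls with - | ⟨x, ls⟩
            · simp only [Option.getD_some]
              rw [if_neg (show ¬ (([l0, r0] : List String).length ≠ 2) by simp)]
              simp only [List.headD_cons, List.drop_succ_cons, List.drop_zero]
              have hfun : (fun q : Int × String => lineMatchA (PySem.Str.lower l0) (PySem.Str.lower r0) q.2)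
                  = (fun q : Int × String => lineMatchB q.2 (PySem.Str.lower l0) (PySem.Str.lower r0)) :=
                funext fun q => lineMatch_eq _ _ _
              rw [PySem.List.foldl_append_if
                (fun q : Int × String => lineMatchA (PySem.Str.lower l0) (PySem.Str.lower r0) q.2)
                (fun q : Int × String => PySem.Int.toStr q.1)
                (PySem.List.enumerate lines 1) [], hfun, List.nil_append]
              rfl
            · rfl

-- ===== VERDICT (by name: the statement is the Claim_ definition above) =====
theorem solve_pattern_spec : Claim_equal_solve_pattern := by
  intro lines query _
  unfold Spec_solve_pattern
  exact solve_pattern_eq lines query
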